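-- pv_equiv track=rewrite | github.com/asd123pwj/asdTools | asdTools/Tools/AI/SDStylesBeautify.py | add_category_head
-- ===== SOURCE A (Python) =====
-- def add_category_head(content:list, delimter='_'):
--     category_heads = []
--     for row in range(len(content)):
--         i = row + len(category_heads)
--         col1 = content[i][0]
--         col1_split = col1.split(delimter)
--         if len(col1_split) >= 2:
--             category_head = col1_split[0]
--             if category_head not in category_heads:
--                 category_heads.append(category_head)
--                 category_row = [''] * len(content[i])
--                 category_row[0] = f"---{category_head}---"
--                 content.insert(i, category_row)
--     return content
-- ===== SOURCE B (Python) =====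
-- def add_category_head(content: list, delimter='_'):
--     # One forward pass over the rows building a new list, then written back in
--     # place (content[:] = out) so the caller-visible mutation matches A.
--     seen = []
--     out = []
--     for row in content:
--         parts = row[0].split(delimter)
--         if len(parts) >= 2 and parts[0] not in seen:
--             seen.append(parts[0])
--             header = [''] * len(row)
--             header[0] = f"---{parts[0]}---"
--             out.append(header)
--         out.append(row)
--     content[:] = out
--     return content
-- ===== Notes on version B (the rewrite author's own statement) =====
-- stated objective: simpler
-- what changed: A walks index positions into the list it is mutating, re-deriving each original row's shifted position from the number of headers inserted so far and calling list.insert; B builds the output in a single forward pass over the original rows with a seen-prefix list and writes it back once.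
import Mathlib
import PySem

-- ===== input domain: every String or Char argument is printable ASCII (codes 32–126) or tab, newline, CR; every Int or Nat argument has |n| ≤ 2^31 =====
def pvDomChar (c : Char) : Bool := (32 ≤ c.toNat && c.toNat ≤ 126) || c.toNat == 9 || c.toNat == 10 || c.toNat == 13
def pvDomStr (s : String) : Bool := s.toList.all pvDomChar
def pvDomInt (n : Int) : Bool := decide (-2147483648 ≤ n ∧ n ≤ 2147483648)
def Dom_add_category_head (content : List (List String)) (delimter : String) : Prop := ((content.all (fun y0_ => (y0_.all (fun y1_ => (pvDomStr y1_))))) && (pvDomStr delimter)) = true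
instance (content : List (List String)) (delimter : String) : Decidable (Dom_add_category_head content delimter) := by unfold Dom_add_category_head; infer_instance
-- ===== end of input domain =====

-- B builds the output in one forward pass over the rows with a seen-prefix list,
-- instead of A's index loop that re-indexes a growing list and inserts into it;
-- equivalence is about the return value (both Pythons mutate `content` to the same
-- final list: A by insert, B by slice assignment).

-- ===== PORT A =====
-- loop body of A's 'for row in range(len(content))' (state: (category_heads, content))
def stepA (delimter : String) (st : List String × List (List String)) (row : Int) :
    List String × List (List String) :=
  let category_heads := st.1
  let content := st.2
  let i : Int := row + category_heads.length
  match PySem.List.pyGet? content i with        -- content[i] (IndexError excluded by Pre_)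
  | none => st
  | some r =>
    let col1 := PySem.List.pyGetD r 0 ""        -- content[i][0] (IndexError excluded by Pre_)
    match PySem.Str.split? col1 delimter with   -- col1.split(delimter) (ValueError on "" sep excluded by Pre_)
    | none => st
    | some col1_split =>
      if col1_split.length ≥ 2 then
        let category_head := PySem.List.pyGetD col1_split 0 ""
        if category_head ∈ category_heads then st
        else
          let category_row := PySem.List.pySetD (List.replicate r.length "") 0
            ("---" ++ category_head ++ "---")
          (category_heads ++ [category_head], PySem.List.insert content i category_row)
      else st

def add_category_head (content : List (List String)) (delimter : String) : List (List String) :=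
  ((PySem.List.pyRange 0 (content.length : Int) 1).foldl (stepA delimter) ([], content)).2

-- ===== PORT B =====
-- loop body of B's 'for row in content' (state: (seen, out))
def stepB (delimter : String) (st : List String × List (List String)) (row : List String) :
    List String × List (List String) :=
  match PySem.Str.split? (PySem.List.pyGetD row 0 "") delimter with
  | none => (st.1, st.2 ++ [row])
  | some parts =>
    if parts.length ≥ 2 ∧ PySem.List.pyGetD parts 0 "" ∉ st.1 then
      let h := PySem.List.pyGetD parts 0 ""
      let header := PySem.List.pySetD (List.replicate row.length "") 0 ("---" ++ h ++ "---")
      (st.1 ++ [h], st.2 ++ [header, row])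
    else (st.1, st.2 ++ [row])

def add_category_head_alt (content : List (List String)) (delimter : String) : List (List String) :=
  (content.foldl (stepB delimter) ([], [])).2

-- ===== PRECONDITION & SPEC =====
-- Pre_ excludes exactly the inputs on which Python A raises: an empty delimiter
-- while content is nonempty (ValueError from str.split) and a content row that is
-- the empty list (IndexError on row[0]).
def Pre_add_category_head (content : List (List String)) (delimter : String) : Prop :=
  (content = [] ∨ delimter ≠ "") ∧ ∀ r ∈ content, r ≠ []
instance (content : List (List String)) (delimter : String) : Decidable (Pre_add_category_head content delimter) := by unfold Pre_add_category_head; infer_instance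

def pvWitness_add_category_head : List (List String) × String :=
  ([["a_b", "x"], ["a_c"], ["z"], ["b_d"]], "_")

def Spec_add_category_head (content : List (List String)) (delimter : String) (out : List (List String)) : Prop := out = add_category_head_alt content delimter
instance (content : List (List String)) (delimter : String) (out : List (List String)) : Decidable (Spec_add_category_head content delimter out) := by unfold Spec_add_category_head; infer_instance

-- ===== CLAIM (what is proved, stated in full; the proofs are below) =====
def Claim_equal_add_category_head : Prop := ∀ (content : List (List String)) (delimter : String), Dom_add_category_head content delimter → Pre_add_category_head content delimter → Spec_add_category_head content delimter (add_category_head content delimter)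

-- ===== LEMMAS AND PROOFS =====

-- one step of A's loop on a state whose list is out ++ r :: rest, at index k,
-- equals one step of B's loop from (heads, out), with rest still appended.
lemma step_rel (delimter : String) (heads : List String) (out : List (List String))
    (r : List String) (rest : List (List String)) (k : ℕ)
    (hlen : out.length = k + heads.length) :
    stepA delimter (heads, out ++ r :: rest) (k : Int)
      = ((stepB delimter (heads, out) r).1, (stepB delimter (heads, out) r).2 ++ rest) := by
  have hidx : (k : Int) + ((heads.length : ℕ) : Int) = ((out.length : ℕ) : Int) := by
    rw [hlen]; push_cast; ring
  unfold stepA stepB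
  dsimp only
  rw [hidx, PySem.List.pyGet?_append_length]
  dsimp only
  cases hsplit : PySem.Str.split? (PySem.List.pyGetD r 0 "") delimter with
  | none => simp
  | some parts =>
    dsimp only
    by_cases h2 : parts.length ≥ 2
    · by_cases hmem : PySem.List.pyGetD parts 0 "" ∈ heads
      · rw [if_pos h2, if_pos hmem, if_neg (by tauto)]
        simp
      · rw [if_pos h2, if_neg hmem, if_pos ⟨h2, hmem⟩]
        dsimp only
        rw [PySem.List.insert_natCast (out ++ r :: rest) out.length _ (by simp)]
        simp
    · rw [if_neg h2, if_neg (by tauto)]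
      simp

-- B's step emits exactly one more output row than new heads
lemma stepB_len (delimter : String) (st : List String × List (List String)) (r : List String) :
    (stepB delimter st r).2.length + st.1.length
      = st.2.length + 1 + (stepB delimter st r).1.length := by
  unfold stepB
  cases PySem.Str.split? (PySem.List.pyGetD r 0 "") delimter with
  | none => simp
  | some parts =>
    simp only
    split_ifs with h
    · simp; omega
    · simp

-- A's index loop over the remaining rows equals B's fold over the remaining rows.
lemma loop_eq (delimter : String) :
    ∀ (rest : List (List String)) (k : ℕ) (heads : List String) (out : List (List String)),
      out.length = k + heads.length →
      (PySem.List.pyRange (k : Int) ((k : Int) + rest.length) 1).foldl (stepA delimter)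
          (heads, out ++ rest)
        = rest.foldl (stepB delimter) (heads, out) := by
  intro rest
  induction rest with
  | nil =>
    intro k heads out hlen
    simp [PySem.List.pyRange_one_eq_nil]
  | cons r rest ih =>
    intro k heads out hlen
    have hcons : PySem.List.pyRange (k : Int) ((k : Int) + ((r :: rest).length : ℕ)) 1
        = (k : Int) :: PySem.List.pyRange ((k : Int) + 1) ((k : Int) + ((r :: rest).length : ℕ)) 1 := by
      apply PySem.List.pyRange_one_cons
      simp
    have hrange : PySem.List.pyRange ((k : Int) + 1) ((k : Int) + ((r :: rest).length : ℕ)) 1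
        = PySem.List.pyRange (((k + 1 : ℕ) : ℕ) : Int) ((((k + 1 : ℕ) : ℕ) : Int) + (rest.length : ℕ)) 1 := by
      congr 1; all_goals (push_cast [List.length_cons]; ring)
    rw [hcons, List.foldl_cons, List.foldl_cons, hrange,
        step_rel delimter heads out r rest k hlen]
    have hl := stepB_len delimter (heads, out) r
    simp only at hl
    have := ih (k + 1) (stepB delimter (heads, out) r).1 (stepB delimter (heads, out) r).2
      (by omega)
    rw [this]

-- ===== VERDICT (by name: the statement is the Claim_ definition above) =====
theorem add_category_head_spec : Claim_equal_add_category_head := by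
  intro content delimter _ _
  unfold Spec_add_category_head add_category_head add_category_head_alt
  have h := loop_eq delimter content 0 [] [] (by simp)
  simp only [Nat.cast_zero, zero_add, List.nil_append] at h
  rw [h]
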